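-- pv_equiv track=rewrite | github.com/bj0/aoc | aoc/2022/d7.py | parse_ls
-- ===== SOURCE A (Python) =====
-- def parse_ls(lines):
--     sz = 0
--     for i, line in enumerate(lines):
--         match line.split():
--             case ["$", *_]:
--                 return sz, lines[i:]
--             case ["dir", _]:
--                 pass
--             case [s, file]:
--                 sz += int(s)
--     return sz, []
-- ===== SOURCE B (Python) =====
-- def parse_ls(lines):
--     # locate the boundary: first line whose split() starts with '$'
--     i = 0
--     while i < len(lines) and lines[i].split()[:1] != ['$']:
--         i += 1
--     # reduce over the prefix in a separate pass
--     sz = sum(int(p[0]) for p in map(str.split, lines[:i])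
--              if len(p) == 2 and p[0] != 'dir')
--     return sz, lines[i:]
-- ===== Notes on version B (the rewrite author's own statement) =====
-- stated objective: alternative
-- what changed: Replaces A's single accumulate-and-early-return loop with a locate-the-'$'-boundary scan followed by a separate filter/sum reduction over the prefix and a slice for the tail.
import Mathlib
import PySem

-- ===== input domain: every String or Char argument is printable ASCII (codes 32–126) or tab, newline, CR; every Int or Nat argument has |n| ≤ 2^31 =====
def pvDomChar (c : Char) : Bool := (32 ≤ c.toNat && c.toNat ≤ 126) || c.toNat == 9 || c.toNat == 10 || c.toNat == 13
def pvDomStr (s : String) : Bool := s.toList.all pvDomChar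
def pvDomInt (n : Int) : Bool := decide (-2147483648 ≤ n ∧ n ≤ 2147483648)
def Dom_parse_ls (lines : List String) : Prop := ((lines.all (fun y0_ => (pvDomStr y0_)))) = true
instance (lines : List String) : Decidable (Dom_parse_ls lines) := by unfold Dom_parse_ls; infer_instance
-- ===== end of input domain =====

-- B locates the prefix boundary first, then sums the file sizes in a separate pass (different decomposition, same cost).


-- ===== PORT A =====
-- A's loop: accumulate sz, early-return (sz, suffix) at the first '$'-command line.
-- int(s) may raise ValueError; Pre_ excludes that, the port uses (ofStr? s).getD 0 there.
def parse_ls_go (sz : Int) : List String → Int × List String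
  | [] => (sz, [])
  | l :: rest =>
    match PySem.Str.split₀ l with
    | "$" :: _ => (sz, l :: rest)
    | ["dir", _] => parse_ls_go sz rest
    | [s, _] => parse_ls_go (sz + (PySem.Int.ofStr? s).getD 0) rest
    | _ => parse_ls_go sz rest

def parse_ls (lines : List String) : Int × List String := parse_ls_go 0 lines

-- ===== PORT B =====
def pvIsCmd (l : String) : Bool := (PySem.Str.split₀ l).take 1 == ["$"]

def parse_ls_alt (lines : List String) : Int × List String :=
  let i := (lines.takeWhile (fun l => !pvIsCmd l)).length
  let sz := ((((lines.take i).map PySem.Str.split₀).filter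
      (fun p => p.length == 2 && (p.getD 0 "" != "dir"))).map
      (fun p => (PySem.Int.ofStr? (p.getD 0 "")).getD 0)).sum
  (sz, lines.drop i)

-- ===== PRECONDITION & SPEC =====
-- Pre_ excludes inputs where Python A raises ValueError: a non-'dir' two-token line
-- before the first '$'-command whose first token is not a valid int literal.
def Pre_parse_ls (lines : List String) : Prop :=
  ∀ l ∈ lines.takeWhile (fun l => !pvIsCmd l),
    ((PySem.Str.split₀ l).length = 2 ∧ (PySem.Str.split₀ l).getD 0 "" ≠ "dir") →
      (PySem.Int.ofStr? ((PySem.Str.split₀ l).getD 0 "")).isSome = true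
instance (lines : List String) : Decidable (Pre_parse_ls lines) := by unfold Pre_parse_ls; infer_instance

def pvWitness_parse_ls : List String := ["1234 a.txt", "dir b", "$ cd x", "junk"]

def Spec_parse_ls (lines : List String) (out : Int × List String) : Prop := out = parse_ls_alt lines
instance (lines : List String) (out : Int × List String) : Decidable (Spec_parse_ls lines out) := by unfold Spec_parse_ls; infer_instance

-- ===== CLAIM (what is proved, stated in full; the proofs are below) =====
def Claim_equal_parse_ls : Prop := ∀ (lines : List String), Dom_parse_ls lines → Pre_parse_ls lines → Spec_parse_ls lines (parse_ls lines)

-- ===== LEMMAS AND PROOFS =====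

theorem alt_nil : parse_ls_alt [] = (0, []) := rfl

theorem alt_cons_cmd (l : String) (rest : List String) (h : pvIsCmd l = true) :
    parse_ls_alt (l :: rest) = (0, l :: rest) := by
  simp [parse_ls_alt, List.takeWhile, h]

theorem alt_cons_not_cmd (l : String) (rest : List String) (h : pvIsCmd l = false) :
    parse_ls_alt (l :: rest) =
      ((if (PySem.Str.split₀ l).length == 2 && ((PySem.Str.split₀ l).getD 0 "" != "dir")
        then (PySem.Int.ofStr? ((PySem.Str.split₀ l).getD 0 "")).getD 0 else 0)
        + (parse_ls_alt rest).1, (parse_ls_alt rest).2) := by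
  by_cases hcond : (PySem.Str.split₀ l).length = 2 ∧ (PySem.Str.split₀ l).getD 0 "" ≠ "dir"
  · obtain ⟨h2, hd⟩ := hcond
    simp only [List.getD] at hd
    simp_all [parse_ls_alt, List.takeWhile]
  · simp only [List.getD] at hcond
    simp [parse_ls_alt, List.takeWhile, h, hcond]

theorem go_eq (lines : List String) : ∀ sz : Int,
    parse_ls_go sz lines = (sz + (parse_ls_alt lines).1, (parse_ls_alt lines).2) := by
  induction lines with
  | nil => intro sz; simp [parse_ls_go, alt_nil]
  | cons l rest ih =>
    intro sz
    by_cases hc : pvIsCmd l = true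
    · have hs : ∃ tl, PySem.Str.split₀ l = "$" :: tl := by
        unfold pvIsCmd at hc
        cases h : PySem.Str.split₀ l with
        | nil => simp [h] at hc
        | cons a tl => simp [h] at hc; exact ⟨tl, by rw [hc]⟩
      obtain ⟨tl, hs⟩ := hs
      rw [alt_cons_cmd l rest hc]
      simp [parse_ls_go, hs]
    · have hc' : pvIsCmd l = false := by simpa using hc
      rw [alt_cons_not_cmd l rest hc']
      have hns : ∀ tl, PySem.Str.split₀ l ≠ "$" :: tl := by
        intro tl h
        unfold pvIsCmd at hc'
        simp [h] at hc'
      cases hp : PySem.Str.split₀ l with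
      | nil => simp [parse_ls_go, hp, ih]
      | cons a tl =>
        cases tl with
        | nil =>
          have : a ≠ "$" := fun h => hns [] (by rw [hp, h])
          simp [parse_ls_go, hp, this, ih]
        | cons b tl2 =>
          cases tl2 with
          | nil =>
            have ha : a ≠ "$" := fun h => hns [b] (by rw [hp, h])
            by_cases hd : a = "dir"
            · subst hd; simp [parse_ls_go, hp, ih]
            · simp [parse_ls_go, hp, hd, ih]; ring
          | cons c tl3 =>
            have ha : a ≠ "$" := fun h => hns (b :: c :: tl3) (by rw [hp, h])
            simp only [parse_ls_go, hp]
            split <;> simp_all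

-- ===== VERDICT (by name: the statement is the Claim_ definition above) =====
theorem parse_ls_spec : Claim_equal_parse_ls := by
  intro lines _ _
  unfold Spec_parse_ls parse_ls
  rw [go_eq]
  simp
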